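-- pv_equiv track=rewrite | github.com/cristhianleonli/ProblemSolving | quee.py | locate_opponents
-- ===== SOURCE A (Python) =====
-- def locate_opponents(opponents, r_q, c_q):
--     memo = {
--         "t": [], "b": [], "r": [], "l": [],
--         "tr": [], "br": [], "bl": [], "tl": []
--     }
--
--     for opponent in opponents:
--         if opponent[1] == c_q and opponent[0] > r_q:
--             memo["t"].append(opponent)
--
--         if opponent[1] == c_q and opponent[0] < r_q:
--             memo["b"].append(opponent)
--
--         if opponent[0] == r_q and opponent[1] > c_q:
--             memo["r"].append(opponent)
--
--         if opponent[0] == r_q and opponent[1] < c_q: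
--             memo["l"].append(opponent)
--
--         diff_r = opponent[0] - r_q
--         diff_c = opponent[1] - c_q
--
--         if abs(diff_r) == abs(diff_c):
--             if diff_r >= 0 and diff_c >= 0:
--                 memo["tr"].append(opponent)
--
--             if diff_r >= 0 and diff_c < 0:
--                 memo["tl"].append(opponent)
--
--             if diff_r < 0 and diff_c >= 0:
--                 memo["br"].append(opponent)
--
--             if diff_r < 0 and diff_c < 0:
--                 memo["bl"].append(opponent)
--
--     return memo
-- ===== SOURCE B (Python) =====
-- def locate_opponents(opponents, r_q, c_q):
--     def classify(o):
--         dr = o[0] - r_q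
--         dc = o[1] - c_q
--         if dc == 0 and dr > 0:
--             return "t"
--         if dc == 0 and dr < 0:
--             return "b"
--         if dr == 0 and dc > 0:
--             return "r"
--         if dr == 0 and dc < 0:
--             return "l"
--         if abs(dr) == abs(dc):
--             if dr >= 0:
--                 return "tr" if dc >= 0 else "tl"
--             return "br" if dc >= 0 else "bl"
--         return None
--
--     return {lab: [o for o in opponents if classify(o) == lab]
--             for lab in ("t", "b", "r", "l", "tr", "br", "bl", "tl")}
-- ===== Notes on version B (the rewrite author's own statement) =====
-- stated objective: simpler
-- what changed: Replaces A's eight independent per-key branch tests with appends into a mutable dict by a single classify(o) direction function and a per-label filter comprehension that builds each bucket directly.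
import Mathlib
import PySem

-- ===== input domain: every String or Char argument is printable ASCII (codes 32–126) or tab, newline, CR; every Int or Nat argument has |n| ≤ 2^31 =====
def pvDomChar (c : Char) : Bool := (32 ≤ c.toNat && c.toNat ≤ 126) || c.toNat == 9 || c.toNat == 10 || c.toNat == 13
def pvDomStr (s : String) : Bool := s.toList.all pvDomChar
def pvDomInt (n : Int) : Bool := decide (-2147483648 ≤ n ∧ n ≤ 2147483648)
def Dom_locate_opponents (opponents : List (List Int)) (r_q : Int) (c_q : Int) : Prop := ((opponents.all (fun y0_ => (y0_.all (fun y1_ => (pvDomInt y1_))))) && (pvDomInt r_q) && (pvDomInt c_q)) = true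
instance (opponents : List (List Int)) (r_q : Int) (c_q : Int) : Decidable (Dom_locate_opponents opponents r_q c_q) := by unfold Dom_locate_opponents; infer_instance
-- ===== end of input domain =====

-- B replaces A's eight independent per-key branch tests mutating a dict by a single
-- classify(o) direction function and one filter per label (objective: simpler decomposition).


-- ===== PORT A =====
-- One iteration of A's loop: the sequential independent `if` tests, each appending to its
-- bucket via dict mutation (memo[k].append → Dict.modify).  opponent[0]/opponent[1] are
-- ported with the total PySem.List.pyGetD; Pre_ guarantees every opponent has length ≥ 2,
-- so the default is never consulted on admitted inputs.
def pvStepA (r_q c_q : Int) (memo : PySem.Dict String (List (List Int))) (opponent : List Int) : PySem.Dict String (List (List Int)) :=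
  let memo := if PySem.List.pyGetD opponent 1 0 = c_q ∧ PySem.List.pyGetD opponent 0 0 > r_q then memo.modify "t" [] (· ++ [opponent]) else memo
  let memo := if PySem.List.pyGetD opponent 1 0 = c_q ∧ PySem.List.pyGetD opponent 0 0 < r_q then memo.modify "b" [] (· ++ [opponent]) else memo
  let memo := if PySem.List.pyGetD opponent 0 0 = r_q ∧ PySem.List.pyGetD opponent 1 0 > c_q then memo.modify "r" [] (· ++ [opponent]) else memo
  let memo := if PySem.List.pyGetD opponent 0 0 = r_q ∧ PySem.List.pyGetD opponent 1 0 < c_q then memo.modify "l" [] (· ++ [opponent]) else memo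
  let diff_r := PySem.List.pyGetD opponent 0 0 - r_q
  let diff_c := PySem.List.pyGetD opponent 1 0 - c_q
  if |diff_r| = |diff_c| then
    let memo := if diff_r ≥ 0 ∧ diff_c ≥ 0 then memo.modify "tr" [] (· ++ [opponent]) else memo
    let memo := if diff_r ≥ 0 ∧ diff_c < 0 then memo.modify "tl" [] (· ++ [opponent]) else memo
    let memo := if diff_r < 0 ∧ diff_c ≥ 0 then memo.modify "br" [] (· ++ [opponent]) else memo
    let memo := if diff_r < 0 ∧ diff_c < 0 then memo.modify "bl" [] (· ++ [opponent]) else memo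
    memo
  else memo

def locate_opponents (opponents : List (List Int)) (r_q : Int) (c_q : Int) : List (String × List (List Int)) :=
  (opponents.foldl (pvStepA r_q c_q)
    (PySem.Dict.mk [("t", []), ("b", []), ("r", []), ("l", []), ("tr", []), ("br", []), ("bl", []), ("tl", [])])).items

-- ===== PORT B =====
-- B's classify(o) helper, split into the pure decision on (dr, dc) and the indexing wrapper.
def pvClassifyD (dr dc : Int) : Option String :=
  if dc = 0 ∧ dr > 0 then some "t"
  else if dc = 0 ∧ dr < 0 then some "b"
  else if dr = 0 ∧ dc > 0 then some "r"
  else if dr = 0 ∧ dc < 0 then some "l"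
  else if |dr| = |dc| then
    if dr ≥ 0 then (if dc ≥ 0 then some "tr" else some "tl")
    else (if dc ≥ 0 then some "br" else some "bl")
  else none

def pvClassify (r_q c_q : Int) (o : List Int) : Option String :=
  pvClassifyD (PySem.List.pyGetD o 0 0 - r_q) (PySem.List.pyGetD o 1 0 - c_q)

def locate_opponents_alt (opponents : List (List Int)) (r_q : Int) (c_q : Int) : List (String × List (List Int)) :=
  ["t", "b", "r", "l", "tr", "br", "bl", "tl"].map
    (fun lab => (lab, opponents.filter (fun o => pvClassify r_q c_q o == some lab)))

-- ===== PRECONDITION & SPEC =====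
-- Pre_ excludes exactly the inputs on which Python A raises IndexError: an opponent list
-- with fewer than two coordinates (opponent[0] / opponent[1] out of range).
def Pre_locate_opponents (opponents : List (List Int)) (r_q : Int) (c_q : Int) : Prop :=
  ∀ o ∈ opponents, 2 ≤ o.length
instance (opponents : List (List Int)) (r_q : Int) (c_q : Int) : Decidable (Pre_locate_opponents opponents r_q c_q) := by unfold Pre_locate_opponents; infer_instance
def pvWitness_locate_opponents : List (List Int) × Int × Int := ([[1, 1], [0, 2], [3, 0]], 0, 0)

def Spec_locate_opponents (opponents : List (List Int)) (r_q : Int) (c_q : Int) (out : List (String × List (List Int))) : Prop := out = locate_opponents_alt opponents r_q c_q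
instance (opponents : List (List Int)) (r_q : Int) (c_q : Int) (out : List (String × List (List Int))) : Decidable (Spec_locate_opponents opponents r_q c_q out) := by unfold Spec_locate_opponents; infer_instance

-- ===== CLAIM (what is proved, stated in full; the proofs are below) =====
def Claim_equal_locate_opponents : Prop := ∀ (opponents : List (List Int)) (r_q : Int) (c_q : Int), Dom_locate_opponents opponents r_q c_q → Pre_locate_opponents opponents r_q c_q → Spec_locate_opponents opponents r_q c_q (locate_opponents opponents r_q c_q)

-- ===== LEMMAS AND PROOFS =====

-- the bucket contribution of one opponent to one label
def pvSel (r_q c_q : Int) (o : List Int) (lab : String) : List (List Int) :=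
  if pvClassify r_q c_q o == some lab then [o] else []

-- One loop step of A extends exactly the bucket B's classify names (and no other).
set_option maxHeartbeats 1000000 in
lemma pvStepA_eq (r_q c_q : Int) (o : List Int)
    (t b r l tr br bl tl : List (List Int)) :
    pvStepA r_q c_q (PySem.Dict.mk [("t", t), ("b", b), ("r", r), ("l", l), ("tr", tr), ("br", br), ("bl", bl), ("tl", tl)]) o
    = PySem.Dict.mk [("t", t ++ pvSel r_q c_q o "t"), ("b", b ++ pvSel r_q c_q o "b"),
        ("r", r ++ pvSel r_q c_q o "r"), ("l", l ++ pvSel r_q c_q o "l"),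
        ("tr", tr ++ pvSel r_q c_q o "tr"), ("br", br ++ pvSel r_q c_q o "br"),
        ("bl", bl ++ pvSel r_q c_q o "bl"), ("tl", tl ++ pvSel r_q c_q o "tl")] := by
  unfold pvSel pvClassify pvStepA
  generalize PySem.List.pyGetD o 0 0 = x
  generalize PySem.List.pyGetD o 1 0 = y
  by_cases hy0 : y = c_q
  · rcases lt_trichotomy x r_q with hx|hx|hx
    · -- same column, below: b
      have hcl : pvClassifyD (x - r_q) (y - c_q) = some "b" := by
        unfold pvClassifyD
        split_ifs with g1 g2 g3 g4 g5 <;> first | rfl | (exfalso; revert g5; simp [abs_eq_abs]; omega) | (exfalso; omega)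
      simp only [hcl, if_neg (show ¬(y = c_q ∧ x > r_q) by omega), if_pos (show (y = c_q ∧ x < r_q) by omega), if_neg (show ¬(x = r_q ∧ y > c_q) by omega), if_neg (show ¬(x = r_q ∧ y < c_q) by omega), if_neg (show ¬(|x - r_q| = |y - c_q|) by rw [show y - c_q = 0 by omega, abs_zero, abs_eq_zero]; omega)]
      simp [PySem.Dict.modify, PySem.Dict.insert, PySem.Dict.getD, PySem.Dict.get?, PySem.Dict.contains]
    · -- queen's own square: tr
      have hcl : pvClassifyD (x - r_q) (y - c_q) = some "tr" := by
        unfold pvClassifyD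
        split_ifs with g1 g2 g3 g4 g5 <;> first | rfl | (exfalso; revert g5; simp [abs_eq_abs]; omega) | (exfalso; omega)
      simp only [hcl, if_neg (show ¬(y = c_q ∧ x > r_q) by omega), if_neg (show ¬(y = c_q ∧ x < r_q) by omega), if_neg (show ¬(x = r_q ∧ y > c_q) by omega), if_neg (show ¬(x = r_q ∧ y < c_q) by omega), if_pos (show (|x - r_q| = |y - c_q|) by rw [show x - r_q = 0 by omega, show y - c_q = 0 by omega]), if_pos (show (x - r_q ≥ 0 ∧ y - c_q ≥ 0) by omega), if_neg (show ¬(x - r_q ≥ 0 ∧ y - c_q < 0) by omega), if_neg (show ¬(x - r_q < 0 ∧ y - c_q ≥ 0) by omega), if_neg (show ¬(x - r_q < 0 ∧ y - c_q < 0) by omega)]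
      simp [PySem.Dict.modify, PySem.Dict.insert, PySem.Dict.getD, PySem.Dict.get?, PySem.Dict.contains]
    · -- same column, above: t
      have hcl : pvClassifyD (x - r_q) (y - c_q) = some "t" := by
        unfold pvClassifyD
        split_ifs with g1 g2 g3 g4 g5 <;> first | rfl | (exfalso; revert g5; simp [abs_eq_abs]; omega) | (exfalso; omega)
      simp only [hcl, if_pos (show (y = c_q ∧ x > r_q) by omega), if_neg (show ¬(y = c_q ∧ x < r_q) by omega), if_neg (show ¬(x = r_q ∧ y > c_q) by omega), if_neg (show ¬(x = r_q ∧ y < c_q) by omega), if_neg (show ¬(|x - r_q| = |y - c_q|) by rw [show y - c_q = 0 by omega, abs_zero, abs_eq_zero]; omega)]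
      simp [PySem.Dict.modify, PySem.Dict.insert, PySem.Dict.getD, PySem.Dict.get?, PySem.Dict.contains]
  · by_cases hx0 : x = r_q
    · rcases lt_trichotomy y c_q with hy|hy|hy
      · -- same row, left: l
        have hcl : pvClassifyD (x - r_q) (y - c_q) = some "l" := by
          unfold pvClassifyD
          split_ifs with g1 g2 g3 g4 g5 <;> first | rfl | (exfalso; revert g5; simp [abs_eq_abs]; omega) | (exfalso; omega)
        simp only [hcl, if_neg (show ¬(y = c_q ∧ x > r_q) by omega), if_neg (show ¬(y = c_q ∧ x < r_q) by omega), if_neg (show ¬(x = r_q ∧ y > c_q) by omega), if_pos (show (x = r_q ∧ y < c_q) by omega), if_neg (show ¬(|x - r_q| = |y - c_q|) by rw [show x - r_q = 0 by omega, abs_zero]; intro h; rw [eq_comm, abs_eq_zero] at h; omega)]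
        simp [PySem.Dict.modify, PySem.Dict.insert, PySem.Dict.getD, PySem.Dict.get?, PySem.Dict.contains]
      · exact absurd hy hy0
      · -- same row, right: r
        have hcl : pvClassifyD (x - r_q) (y - c_q) = some "r" := by
          unfold pvClassifyD
          split_ifs with g1 g2 g3 g4 g5 <;> first | rfl | (exfalso; revert g5; simp [abs_eq_abs]; omega) | (exfalso; omega)
        simp only [hcl, if_neg (show ¬(y = c_q ∧ x > r_q) by omega), if_neg (show ¬(y = c_q ∧ x < r_q) by omega), if_pos (show (x = r_q ∧ y > c_q) by omega), if_neg (show ¬(x = r_q ∧ y < c_q) by omega), if_neg (show ¬(|x - r_q| = |y - c_q|) by rw [show x - r_q = 0 by omega, abs_zero]; intro h; rw [eq_comm, abs_eq_zero] at h; omega)]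
        simp [PySem.Dict.modify, PySem.Dict.insert, PySem.Dict.getD, PySem.Dict.get?, PySem.Dict.contains]
    · by_cases hd : |x - r_q| = |y - c_q|
      · -- proper diagonal
        have habs := abs_eq_abs.mp hd
        rcases lt_trichotomy x r_q with hx|hx|hx <;> rcases lt_trichotomy y c_q with hy|hy|hy <;>
          first
          | exact absurd hx hx0
          | exact absurd hy hy0
          | (have hsign : x < r_q ∧ y < c_q := ⟨by omega, by omega⟩
             have hcl : pvClassifyD (x - r_q) (y - c_q) = some "bl" := by
               unfold pvClassifyD
               split_ifs with g1 g2 g3 g4 g5 <;> first | rfl | (exfalso; revert g5; simp [abs_eq_abs]; omega) | (exfalso; omega)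
             simp only [hcl, if_neg (show ¬(y = c_q ∧ x > r_q) by omega), if_neg (show ¬(y = c_q ∧ x < r_q) by omega), if_neg (show ¬(x = r_q ∧ y > c_q) by omega), if_neg (show ¬(x = r_q ∧ y < c_q) by omega), if_pos hd, if_neg (show ¬(x - r_q ≥ 0 ∧ y - c_q ≥ 0) by omega), if_neg (show ¬(x - r_q ≥ 0 ∧ y - c_q < 0) by omega), if_neg (show ¬(x - r_q < 0 ∧ y - c_q ≥ 0) by omega), if_pos (show (x - r_q < 0 ∧ y - c_q < 0) by omega)]
             simp [PySem.Dict.modify, PySem.Dict.insert, PySem.Dict.getD, PySem.Dict.get?, PySem.Dict.contains])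
          | (have hsign : x < r_q ∧ c_q < y := ⟨by omega, by omega⟩
             have hcl : pvClassifyD (x - r_q) (y - c_q) = some "br" := by
               unfold pvClassifyD
               split_ifs with g1 g2 g3 g4 g5 <;> first | rfl | (exfalso; revert g5; simp [abs_eq_abs]; omega) | (exfalso; omega)
             simp only [hcl, if_neg (show ¬(y = c_q ∧ x > r_q) by omega), if_neg (show ¬(y = c_q ∧ x < r_q) by omega), if_neg (show ¬(x = r_q ∧ y > c_q) by omega), if_neg (show ¬(x = r_q ∧ y < c_q) by omega), if_pos hd, if_neg (show ¬(x - r_q ≥ 0 ∧ y - c_q ≥ 0) by omega), if_neg (show ¬(x - r_q ≥ 0 ∧ y - c_q < 0) by omega), if_pos (show (x - r_q < 0 ∧ y - c_q ≥ 0) by omega), if_neg (show ¬(x - r_q < 0 ∧ y - c_q < 0) by omega)]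
             simp [PySem.Dict.modify, PySem.Dict.insert, PySem.Dict.getD, PySem.Dict.get?, PySem.Dict.contains])
          | (have hsign : r_q < x ∧ y < c_q := ⟨by omega, by omega⟩
             have hcl : pvClassifyD (x - r_q) (y - c_q) = some "tl" := by
               unfold pvClassifyD
               split_ifs with g1 g2 g3 g4 g5 <;> first | rfl | (exfalso; revert g5; simp [abs_eq_abs]; omega) | (exfalso; omega)
             simp only [hcl, if_neg (show ¬(y = c_q ∧ x > r_q) by omega), if_neg (show ¬(y = c_q ∧ x < r_q) by omega), if_neg (show ¬(x = r_q ∧ y > c_q) by omega), if_neg (show ¬(x = r_q ∧ y < c_q) by omega), if_pos hd, if_neg (show ¬(x - r_q ≥ 0 ∧ y - c_q ≥ 0) by omega), if_pos (show (x - r_q ≥ 0 ∧ y - c_q < 0) by omega), if_neg (show ¬(x - r_q < 0 ∧ y - c_q ≥ 0) by omega), if_neg (show ¬(x - r_q < 0 ∧ y - c_q < 0) by omega)]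
             simp [PySem.Dict.modify, PySem.Dict.insert, PySem.Dict.getD, PySem.Dict.get?, PySem.Dict.contains])
          | (have hsign : r_q < x ∧ c_q < y := ⟨by omega, by omega⟩
             have hcl : pvClassifyD (x - r_q) (y - c_q) = some "tr" := by
               unfold pvClassifyD
               split_ifs with g1 g2 g3 g4 g5 <;> first | rfl | (exfalso; revert g5; simp [abs_eq_abs]; omega) | (exfalso; omega)
             simp only [hcl, if_neg (show ¬(y = c_q ∧ x > r_q) by omega), if_neg (show ¬(y = c_q ∧ x < r_q) by omega), if_neg (show ¬(x = r_q ∧ y > c_q) by omega), if_neg (show ¬(x = r_q ∧ y < c_q) by omega), if_pos hd, if_pos (show (x - r_q ≥ 0 ∧ y - c_q ≥ 0) by omega), if_neg (show ¬(x - r_q ≥ 0 ∧ y - c_q < 0) by omega), if_neg (show ¬(x - r_q < 0 ∧ y - c_q ≥ 0) by omega), if_neg (show ¬(x - r_q < 0 ∧ y - c_q < 0) by omega)]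
             simp [PySem.Dict.modify, PySem.Dict.insert, PySem.Dict.getD, PySem.Dict.get?, PySem.Dict.contains])
      · -- no line through the queen: skipped
        have hcl : pvClassifyD (x - r_q) (y - c_q) = none := by
          unfold pvClassifyD
          split_ifs with g1 g2 g3 g4 g5 <;> first | rfl | (exfalso; revert g5; simp [abs_eq_abs]; omega) | (exfalso; omega)
        simp only [hcl, if_neg (show ¬(y = c_q ∧ x > r_q) by omega), if_neg (show ¬(y = c_q ∧ x < r_q) by omega), if_neg (show ¬(x = r_q ∧ y > c_q) by omega), if_neg (show ¬(x = r_q ∧ y < c_q) by omega), if_neg hd]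
        simp [PySem.Dict.modify, PySem.Dict.insert, PySem.Dict.getD, PySem.Dict.get?, PySem.Dict.contains]

-- A's whole fold, started from arbitrary bucket contents, ends with each bucket extended
-- by B's filter for its label.
lemma pvFoldl_eq (r_q c_q : Int) (ops : List (List Int))
    (t b r l tr br bl tl : List (List Int)) :
    ops.foldl (pvStepA r_q c_q)
      (PySem.Dict.mk [("t", t), ("b", b), ("r", r), ("l", l), ("tr", tr), ("br", br), ("bl", bl), ("tl", tl)])
    = PySem.Dict.mk
      [("t", t ++ ops.filter (fun o => pvClassify r_q c_q o == some "t")),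
       ("b", b ++ ops.filter (fun o => pvClassify r_q c_q o == some "b")),
       ("r", r ++ ops.filter (fun o => pvClassify r_q c_q o == some "r")),
       ("l", l ++ ops.filter (fun o => pvClassify r_q c_q o == some "l")),
       ("tr", tr ++ ops.filter (fun o => pvClassify r_q c_q o == some "tr")),
       ("br", br ++ ops.filter (fun o => pvClassify r_q c_q o == some "br")),
       ("bl", bl ++ ops.filter (fun o => pvClassify r_q c_q o == some "bl")),
       ("tl", tl ++ ops.filter (fun o => pvClassify r_q c_q o == some "tl"))] := by
  induction ops generalizing t b r l tr br bl tl with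
  | nil => simp
  | cons o ops ih =>
    rw [List.foldl_cons, pvStepA_eq, ih]
    simp only [List.filter_cons, pvSel]
    by_cases h1 : pvClassify r_q c_q o == some "t" <;>
    by_cases h2 : pvClassify r_q c_q o == some "b" <;>
    by_cases h3 : pvClassify r_q c_q o == some "r" <;>
    by_cases h4 : pvClassify r_q c_q o == some "l" <;>
    by_cases h5 : pvClassify r_q c_q o == some "tr" <;>
    by_cases h6 : pvClassify r_q c_q o == some "br" <;>
    by_cases h7 : pvClassify r_q c_q o == some "bl" <;>
    by_cases h8 : pvClassify r_q c_q o == some "tl" <;>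
      simp [h1, h2, h3, h4, h5, h6, h7, h8]

-- ===== VERDICT (by name: the statement is the Claim_ definition above) =====
theorem locate_opponents_spec : Claim_equal_locate_opponents := by
  intro opponents r_q c_q _ _
  unfold Spec_locate_opponents locate_opponents locate_opponents_alt
  rw [pvFoldl_eq]
  simp
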